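-- pv_equiv track=rewrite | github.com/demetoir/ps-solved-code | boj/1564.py | f
-- ===== SOURCE A (Python) =====
-- def f(n):
--     l=[i for i in range(n+1)]
--     k=5
--     five=0
--     while k<n:
--           five+=n//k
--           for i in range(k,n+1,k):
--               l[i]=l[i]//5
--           k*=5
--     for i in range(2,2*five+1,2):
--         l[i]=l[i]//2
--     return l
-- ===== SOURCE B (Python) =====
-- def f(n):
--     five = 0
--     k = 5
--     while k < n:
--         five += n // k
--         k *= 5
--     out = []
--     for i in range(n + 1):
--         x = i
--         p = 5
--         while p < n and i % p == 0:
--             x //= 5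
--             p *= 5
--         if i % 2 == 0 and 0 < i <= 2 * five:
--             x //= 2
--         out.append(x)
--     return out
-- ===== Notes on version B (the rewrite author's own statement) =====
-- stated objective: alternative
-- what changed: Replaces A's in-place strided sieve (for each power 5^j < n, divide every 5^j-th slot by 5, then a second in-place pass halving slots 2..2*five) by a standalone loop accumulating five and a single pass that computes each entry independently from its own index via a per-index while loop over powers of 5 plus a direct parity/bound test.
import Mathlib
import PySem

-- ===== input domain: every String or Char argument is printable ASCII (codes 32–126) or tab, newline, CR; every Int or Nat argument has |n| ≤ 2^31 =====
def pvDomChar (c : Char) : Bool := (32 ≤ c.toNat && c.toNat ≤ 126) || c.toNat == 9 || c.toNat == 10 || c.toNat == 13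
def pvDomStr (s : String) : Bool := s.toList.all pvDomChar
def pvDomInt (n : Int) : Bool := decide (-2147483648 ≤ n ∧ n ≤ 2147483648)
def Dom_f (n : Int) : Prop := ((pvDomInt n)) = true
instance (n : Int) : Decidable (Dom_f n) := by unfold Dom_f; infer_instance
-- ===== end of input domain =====

-- B replaces A's in-place strided sieve (dividing every k-th slot by 5 for k = 5,25,…, then an
-- in-place pass halving slots 2..2*five) by a separate 'five' accumulation loop and one pass that
-- computes each entry independently from its index; objective: alternative (same asymptotic cost).

-- ===== PORT A =====
-- A's while loop: carries (five, l); the inner 'for i in range(k,n+1,k): l[i]=l[i]//5' is the foldl.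
-- The proof argument hk records that k stays positive (k starts at 5 and is multiplied by 5);
-- it is needed only for termination.
def fWhileA (n k five : Int) (l : List Int) (hk : 0 < k) : Int × List Int :=
  if h : k < n then
    fWhileA n (k * 5) (five + PySem.Int.floordiv n k)
      ((PySem.List.pyRange k (n + 1) k).foldl
        (fun acc i => PySem.List.pySetD acc i (PySem.Int.floordiv (PySem.List.pyGetD acc i 0) 5)) l)
      (by omega)
  else (five, l)
termination_by (n - k).toNat
decreasing_by omega

def f (n : Int) : List Int :=
  let l := PySem.List.pyRange 0 (n + 1) 1
  let r := fWhileA n 5 0 l (by norm_num)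
  (PySem.List.pyRange 2 (2 * r.1 + 1) 2).foldl
    (fun acc i => PySem.List.pySetD acc i (PySem.Int.floordiv (PySem.List.pyGetD acc i 0) 2)) r.2

-- ===== PORT B =====
-- B's standalone 'five' loop: while k < n: five += n // k; k *= 5
def fFive (n k five : Int) (hk : 0 < k) : Int :=
  if h : k < n then fFive n (k * 5) (five + PySem.Int.floordiv n k) (by omega) else five
termination_by (n - k).toNat
decreasing_by omega

-- B's per-index inner loop: while p < n and i % p == 0: x //= 5; p *= 5
def fInner (n p i x : Int) (hp : 0 < p) : Int :=
  if h : p < n ∧ PySem.Int.mod i p = 0 then fInner n (p * 5) i (PySem.Int.floordiv x 5) (by omega)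
  else x
termination_by (n - p).toNat
decreasing_by omega

def f_alt (n : Int) : List Int :=
  let five := fFive n 5 0 (by norm_num)
  (PySem.List.pyRange 0 (n + 1) 1).map (fun i =>
    let x := fInner n 5 i i (by norm_num)
    if PySem.Int.mod i 2 = 0 ∧ 0 < i ∧ i ≤ 2 * five then PySem.Int.floordiv x 2 else x)

-- ===== PRECONDITION & SPEC =====
def Spec_f (n : Int) (out : List Int) : Prop := out = f_alt n
instance (n : Int) (out : List Int) : Decidable (Spec_f n out) := by unfold Spec_f; infer_instance

-- ===== CLAIM (what is proved, stated in full; the proofs are below) =====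
def Claim_equal_f : Prop := ∀ (n : Int), Dom_f n → Spec_f n (f n)

-- ===== LEMMAS AND PROOFS =====

-- dividing 0 by 5 forever stays 0: B's inner loop at index 0
theorem fInner_zero (n p : Int) (hp : 0 < p) : fInner n p 0 0 hp = 0 := by
  rw [fInner]
  split
  · rename_i h
    have h5 : PySem.Int.floordiv 0 5 = 0 := by
      rw [PySem.Int.floordiv_eq_ediv_of_pos (by norm_num)]; norm_num
    rw [h5]
    exact fInner_zero n (p * 5) (by omega)
  · rfl
termination_by (n - p).toNat
decreasing_by omega

-- if k does not divide i, the inner loop started at p = k*5 (or at k) leaves x unchanged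
theorem fInner_stop (n k i x : Int) (hk : 0 < k) (hki : ¬ k ∣ i) (hk5 : 0 < k * 5) :
    fInner n (k * 5) i x hk5 = x := by
  rw [fInner]
  split
  · rename_i h
    exact absurd (dvd_trans ⟨5, rfl⟩ ((PySem.Int.mod_eq_zero_iff_dvd i (k * 5)).1 h.2)) hki
  · rfl

theorem fInner_stop_self (n k i x : Int) (hk : 0 < k) (hki : ¬ k ∣ i) :
    fInner n k i x hk = x := by
  rw [fInner]
  split
  · rename_i h
    exact absurd ((PySem.Int.mod_eq_zero_iff_dvd i k).1 h.2) hki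
  · rfl

-- length of a pass of in-place updates
theorem foldl_upd_length (c : Int) (idxs : List Int) (l : List Int) :
    (idxs.foldl
      (fun acc i => PySem.List.pySetD acc i (PySem.Int.floordiv (PySem.List.pyGetD acc i 0) c)) l).length
      = l.length := by
  induction idxs generalizing l with
  | nil => rfl
  | cons j t ih => rw [List.foldl_cons, ih _, PySem.List.length_pySetD]

-- one in-place pass dividing the slots listed in idxs (distinct, in bounds) by c, read pointwise
theorem foldl_upd_getD (c : Int) (idxs : List Int) (l : List Int)
    (hb : ∀ j ∈ idxs, 0 ≤ j ∧ j < (l.length : Int)) (hnd : idxs.Nodup)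
    (i : Nat) (hi : i < l.length) :
    (idxs.foldl
      (fun acc j => PySem.List.pySetD acc j (PySem.Int.floordiv (PySem.List.pyGetD acc j 0) c)) l).getD i 0
      = if (i : Int) ∈ idxs then PySem.Int.floordiv (l.getD i 0) c else l.getD i 0 := by
  induction idxs generalizing l with
  | nil => simp
  | cons j t ih =>
    have hj := hb j (by simp)
    have hjn : j = ((j.toNat : Nat) : Int) := by omega
    have h1 : j.toNat < l.length := by omega
    have hset : PySem.List.pySetD l j (PySem.Int.floordiv (PySem.List.pyGetD l j 0) c)
        = l.set j.toNat (PySem.Int.floordiv (l.getD j.toNat 0) c) := by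
      rw [hjn, PySem.List.pySetD_natCast, PySem.List.pyGetD_natCast]
      simp only [Int.toNat_natCast]
    have hget : ∀ m : Nat,
        (l.set j.toNat (PySem.Int.floordiv (l.getD j.toNat 0) c)).getD m 0
        = if m = j.toNat then PySem.Int.floordiv (l.getD j.toNat 0) c else l.getD m 0 := by
      intro m
      by_cases hmj : m = j.toNat
      · subst hmj; simp [List.getD, List.getElem?_set, h1]
      · simp only [List.getD, List.getElem?_set]
        rw [if_neg (fun h => hmj h.symm), if_neg hmj]
    rw [List.foldl_cons, hset,
      ih _ (by intro a ha; have := hb a (by simp [ha]); simpa using this)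
        hnd.of_cons (by simpa using hi)]
    by_cases hit : (i : Int) ∈ t
    · have hij : (i : Int) ≠ j := by
        rintro rfl; exact (List.nodup_cons.1 hnd).1 hit
      rw [if_pos hit, hget i, if_neg (by omega : ¬ i = j.toNat),
        if_pos (List.mem_cons.2 (Or.inr hit))]
    · by_cases hij : (i : Int) = j
      · have hij' : i = j.toNat := by omega
        rw [if_neg hit, hget i, if_pos hij', if_pos (List.mem_cons.2 (Or.inl hij)), ← hij']
      · rw [if_neg hit, hget i, if_neg (by omega : ¬ i = j.toNat),
          if_neg (by simp [List.mem_cons, hij, hit])]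

-- a positive-step range has no duplicates
theorem nodup_pyRange_pos (a b s : Int) (hs : 0 < s) : (PySem.List.pyRange a b s).Nodup := by
  rw [PySem.List.pyRange_of_pos a b hs]
  refine List.Nodup.map (fun x y hxy => ?_) (List.nodup_range)
  have h2 : s * (x : Int) = s * (y : Int) := by omega
  have := mul_left_cancel₀ (by omega : s ≠ 0) h2
  omega

-- A's while loop computes the same 'five' as B's standalone loop
theorem fWhileA_fst (n : Int) : ∀ (k five : Int) (hk : 0 < k) (l : List Int),
    (fWhileA n k five l hk).1 = fFive n k five hk := by
  intro k five hk l
  rw [fWhileA, fFive]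
  split
  · exact fWhileA_fst n _ _ _ _
  · rfl
termination_by k => (n - k).toNat
decreasing_by rename_i h; omega

theorem fWhileA_snd_length (n : Int) : ∀ (k five : Int) (hk : 0 < k) (l : List Int),
    (fWhileA n k five l hk).2.length = l.length := by
  intro k five hk l
  rw [fWhileA]
  split
  · rw [fWhileA_snd_length n _ _ _ _, foldl_upd_length]
  · rfl
termination_by k => (n - k).toNat
decreasing_by rename_i h; omega

-- the heart: after A's sieve, slot i holds what B's per-index loop computes from the old slot value
theorem fWhileA_snd_getD (n : Int) (hn : 0 ≤ n) :
    ∀ (k five : Int) (hk : 0 < k) (l : List Int), l.length = (n + 1).toNat →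
    ∀ i : Nat, i < l.length →
    (fWhileA n k five l hk).2.getD i 0
      = if i = 0 then l.getD 0 0 else fInner n k i (l.getD i 0) hk := by
  intro k five hk l hlen i hi
  rw [fWhileA]
  split
  · rename_i h
    have hlen2 : (List.foldl
        (fun acc i => PySem.List.pySetD acc i (PySem.Int.floordiv (PySem.List.pyGetD acc i 0) 5))
        l (PySem.List.pyRange k (n + 1) k)).length = l.length := foldl_upd_length 5 _ l
    have hget2 : ∀ m : Nat, m < l.length →
        (List.foldl
          (fun acc i => PySem.List.pySetD acc i (PySem.Int.floordiv (PySem.List.pyGetD acc i 0) 5))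
          l (PySem.List.pyRange k (n + 1) k)).getD m 0
        = if (m : Int) ∈ PySem.List.pyRange k (n + 1) k
          then PySem.Int.floordiv (l.getD m 0) 5 else l.getD m 0 := by
      intro m hm
      have := foldl_upd_getD 5 (PySem.List.pyRange k (n + 1) k) l
        (by intro j hj
            rw [PySem.List.mem_pyRange_iff_of_pos hk] at hj
            constructor
            · omega
            · have : ((n + 1).toNat : Int) = n + 1 := by omega
              omega)
        (nodup_pyRange_pos _ _ _ hk) m hm
      exact this
    rw [fWhileA_snd_getD n hn (k * 5) _ (by omega) _ (by rw [hlen2, hlen]) i (by omega)]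
    by_cases hi0 : i = 0
    · subst hi0
      have h0 : ((0 : Nat) : Int) ∉ PySem.List.pyRange k (n + 1) k := by
        rw [PySem.List.mem_pyRange_iff_of_pos hk]; omega
      rw [if_pos rfl, if_pos rfl, hget2 0 (by omega), if_neg h0]
    · rw [if_neg hi0, if_neg hi0, hget2 i hi]
      by_cases hdvd : k ∣ (i : Int)
      · have hik : k ≤ (i : Int) := Int.le_of_dvd (by omega) hdvd
        have hmem : (i : Int) ∈ PySem.List.pyRange k (n + 1) k := by
          rw [PySem.List.mem_pyRange_iff_of_pos hk]
          refine ⟨hik, ?_, dvd_sub hdvd dvd_rfl⟩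
          have : ((n + 1).toNat : Int) = n + 1 := by omega
          omega
        rw [if_pos hmem]
        conv_rhs => rw [fInner]
        rw [dif_pos ⟨h, (PySem.Int.mod_eq_zero_iff_dvd _ _).2 hdvd⟩]
      · have hnmem : (i : Int) ∉ PySem.List.pyRange k (n + 1) k := by
          rw [PySem.List.mem_pyRange_iff_of_pos hk]
          rintro ⟨h1, h2, h3⟩
          exact hdvd (by simpa using dvd_add h3 (dvd_refl k))
        rw [if_neg hnmem, fInner_stop n k _ _ hk hdvd, fInner_stop_self n k _ _ hk hdvd]
  · rename_i h
    by_cases hi0 : i = 0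
    · subst hi0; rw [if_pos rfl]
    · rw [if_neg hi0, fInner, dif_neg (fun hc => h hc.1)]
termination_by k => (n - k).toNat
decreasing_by rename_i h _ _ _ _ _ _; omega

-- accumulator monotonicity and the size bound 4·k·(five' − five) ≤ 5·n for B's five loop
theorem fFive_mono (n : Int) : ∀ (k five : Int) (hk : 0 < k), five ≤ fFive n k five hk := by
  intro k five hk
  rw [fFive]
  split
  · rename_i h
    have hq : 0 ≤ PySem.Int.floordiv n k := by
      rw [PySem.Int.floordiv_eq_ediv_of_pos hk]
      exact Int.ediv_nonneg (by omega) (by omega)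
    have := fFive_mono n (k * 5) (five + PySem.Int.floordiv n k) (by omega)
    omega
  · exact le_refl _
termination_by k => (n - k).toNat
decreasing_by rename_i h; omega

theorem fFive_bound (n : Int) (hn : 0 ≤ n) :
    ∀ (k five : Int) (hk : 0 < k), 4 * (k * (fFive n k five hk - five)) ≤ 5 * n := by
  intro k five hk
  rw [fFive]
  split
  · rename_i h
    have hqk : PySem.Int.floordiv n k * k + PySem.Int.mod n k = n :=
      PySem.Int.floordiv_mul_add_mod n k
    have hr : 0 ≤ PySem.Int.mod n k := PySem.Int.mod_nonneg n hk
    have IH := fFive_bound n hn (k * 5) (five + PySem.Int.floordiv n k) (by omega)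
    set F := fFive n (k * 5) (five + PySem.Int.floordiv n k) (by omega : (0:Int) < k * 5) with hF
    set q := PySem.Int.floordiv n k with hq
    have e1 : k * 5 * (F - (five + q)) = 5 * (k * (F - five - q)) := by ring
    rw [e1] at IH
    have e2 : k * (F - five) = k * (F - five - q) + k * q := by ring
    rw [e2]
    have e3 : k * q = q * k := by ring
    linarith
  · have e : five - five = 0 := by omega
    rw [e, mul_zero, mul_zero]
    omega
termination_by k five => (n - k).toNat
decreasing_by rename_i h _ _; omega

-- main equivalence, as an explicit equation
theorem f_eq_f_alt (n : Int) : f n = f_alt n := by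
  unfold f f_alt
  dsimp only
  by_cases hn5 : 5 < n
  · -- the sieve really runs: n ≥ 6
    have hn : 0 ≤ n := by omega
    set l0 := PySem.List.pyRange 0 (n + 1) 1 with hl0
    have hlen0 : l0.length = (n + 1).toNat := by
      rw [hl0, PySem.List.length_pyRange_one]; norm_num
    have hget0 : ∀ m : Nat, m < l0.length → l0.getD m 0 = (m : Int) := by
      intro m hm
      rw [List.getD_eq_getElem l0 0 hm]
      simp [hl0, PySem.List.getElem_pyRange_one]
    have hfive := fWhileA_fst n 5 0 (by norm_num) l0
    set F := fFive n 5 0 (by norm_num) with hFdef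
    have hF0 : 0 ≤ F := fFive_mono n 5 0 (by norm_num)
    have hFb : 4 * (5 * (F - 0)) ≤ 5 * n := fFive_bound n hn 5 0 (by norm_num)
    have hFn : 2 * F ≤ n := by omega
    have hWlen : (fWhileA n 5 0 l0 (by norm_num)).2.length = l0.length :=
      fWhileA_snd_length n 5 0 (by norm_num) l0
    have hWget := fWhileA_snd_getD n hn 5 0 (by norm_num) l0 hlen0
    rw [hfive]
    apply List.ext_getElem
    · rw [foldl_upd_length, hWlen, List.length_map]
    · intro i h1 h2
      have hiW : i < (fWhileA n 5 0 l0 (by norm_num)).2.length := by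
        rw [foldl_upd_length] at h1; omega
      have hil : i < l0.length := by rw [← hWlen]; exact hiW
      have hiln : (i : Int) ≤ n := by
        rw [hlen0] at hil; omega
      -- LHS: the halving pass, read pointwise
      rw [← List.getD_eq_getElem _ 0 h1,
        foldl_upd_getD 2 _ _
          (by intro j hj
              rw [PySem.List.mem_pyRange_iff_of_pos (by norm_num : (0:Int) < 2)] at hj
              have : ((fWhileA n 5 0 l0 (by norm_num)).2.length : Int) = n + 1 := by
                rw [hWlen, hlen0]; omega
              omega)
          (nodup_pyRange_pos _ _ _ (by norm_num)) i hiW,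
        hWget i hil]
      -- RHS: the map, read pointwise
      rw [List.length_map] at h2
      rw [List.getElem_map, ← List.getD_eq_getElem l0 0 h2, hget0 i h2]
      by_cases hi0 : i = 0
      · subst hi0
        have h0m : ((0:Nat) : Int) ∉ PySem.List.pyRange 2 (2 * F + 1) 2 := by
          rw [PySem.List.mem_pyRange_iff_of_pos (by norm_num)]; omega
        rw [if_pos rfl, if_neg h0m, hget0 0 (by omega)]
        have hz := fInner_zero n 5 (by norm_num)
        simp only [Nat.cast_zero, hz]
        rw [if_neg (by rintro ⟨-, h2', h3'⟩; omega)]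
      · rw [if_neg hi0]
        have hmem : (i : Int) ∈ PySem.List.pyRange 2 (2 * F + 1) 2
            ↔ (PySem.Int.mod (i : Int) 2 = 0 ∧ 0 < (i : Int) ∧ (i : Int) ≤ 2 * F) := by
          rw [PySem.List.mem_pyRange_iff_of_pos (by norm_num), PySem.Int.mod_eq_zero_iff_dvd]
          constructor
          · rintro ⟨a, b, c⟩; omega
          · rintro ⟨a, b, c⟩; omega
        by_cases hc : PySem.Int.mod (i : Int) 2 = 0 ∧ 0 < (i : Int) ∧ (i : Int) ≤ 2 * F
        · rw [if_pos (hmem.2 hc)]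
          simp only [if_pos hc]
        · rw [if_neg (fun hm => hc (hmem.1 hm))]
          simp only [if_neg hc]
  · -- n ≤ 5: the while loop never runs and five = 0
    rw [fWhileA, fFive, dif_neg hn5, dif_neg hn5]
    have hr2 : PySem.List.pyRange 2 (2 * (0:Int) + 1) 2 = [] := by decide
    rw [hr2]
    have hg : ∀ i ∈ PySem.List.pyRange 0 (n + 1) 1,
        (fun i =>
          let x := fInner n 5 i i (by norm_num)
          if PySem.Int.mod i 2 = 0 ∧ 0 < i ∧ i ≤ 2 * (0:Int) then PySem.Int.floordiv x 2 else x) i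
          = i := by
      intro i _
      simp only
      rw [fInner, dif_neg (fun hc => hn5 hc.1)]
      rw [if_neg (by rintro ⟨-, h2', h3'⟩; omega)]
    rw [List.map_congr_left hg, List.map_id']
    rfl

-- ===== VERDICT (by name: the statement is the Claim_ definition above) =====
theorem f_spec : Claim_equal_f := by
  intro n _
  unfold Spec_f
  exact f_eq_f_alt n
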